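-- pv_equiv track=rewrite | github.com/GitMonsters/octotetrahedral-agi | arc-puzzle-catalog/solves/63432b70/solver.py | transform
-- ===== SOURCE A (Python) =====
-- from collections import Counter
--
-- def transform(grid):
--     rows, cols = len(grid), len(grid[0])
--
--     bg = Counter(grid[r][c] for r in range(rows) for c in range(cols)).most_common(1)[0][0]
--
--     non_bg = Counter(v for r in grid for v in r if v != bg)
--     sorted_colors = non_bg.most_common()
--     inter_color = sorted_colors[1][0] if len(sorted_colors) >= 2 else sorted_colors[0][0]
--
--     # For each non-bg pixel, find horizontal and vertical run lengths
--     def h_run_len(r, c):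
--         color = grid[r][c]
--         l = c
--         while l > 0 and grid[r][l-1] == color: l -= 1
--         ri = c
--         while ri < cols-1 and grid[r][ri+1] == color: ri += 1
--         return ri - l + 1
--
--     def v_run_len(r, c):
--         color = grid[r][c]
--         t = r
--         while t > 0 and grid[t-1][c] == color: t -= 1
--         b = r
--         while b < rows-1 and grid[b+1][c] == color: b += 1
--         return b - t + 1
--
--     # Determine row-lines and col-lines
--     row_lines = {}
--     col_lines = {}
--
--     for r in range(rows):
--         for c in range(cols):
--             if grid[r][c] == bg:
--                 continue
--             color = grid[r][c]
--             h = h_run_len(r, c)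
--             v = v_run_len(r, c)
--
--             if h >= 2 and h > v:
--                 # Horizontal pixel -> defines row-line
--                 if r not in row_lines:
--                     row_lines[r] = color
--             elif v >= 2 and v > h:
--                 # Vertical pixel -> defines col-line
--                 if c not in col_lines:
--                     col_lines[c] = color
--             elif h >= 2 and v >= 2:
--                 # Tie -> prefer vertical
--                 if c not in col_lines:
--                     col_lines[c] = color
--             # Single isolated pixel: ignore (length 1 in both dirs)
--
--     # Build output
--     out = [[bg]*cols for _ in range(rows)]
--     for r in range(rows):
--         for c in range(cols):
--             r_line = r in row_lines
--             c_line = c in col_lines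
--             if r_line and c_line:
--                 out[r][c] = inter_color
--             elif r_line:
--                 out[r][c] = row_lines[r]
--             elif c_line:
--                 out[r][c] = col_lines[c]
--
--     return out
-- ===== SOURCE B (Python) =====
-- from collections import Counter
--
-- def transform(grid):
--     rows, cols = len(grid), len(grid[0])
--
--     bg = Counter(grid[r][c] for r in range(rows) for c in range(cols)).most_common(1)[0][0]
--     non_bg = Counter(v for r in grid for v in r if v != bg)
--     sorted_colors = non_bg.most_common()
--     inter_color = sorted_colors[1][0] if len(sorted_colors) >= 2 else sorted_colors[0][0]
--
--     # run lengths of the maximal constant run containing each cell, two linear passes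
--     def run_lens(line):
--         n = len(line)
--         left = []
--         for c in range(n):
--             left.append(left[-1] + 1 if c > 0 and line[c - 1] == line[c] else 1)
--         res = []
--         for c in range(n - 1, -1, -1):
--             if c + 1 < n and line[c + 1] == line[c]:
--                 res.append(res[-1])
--             else:
--                 res.append(left[c])
--         res.reverse()
--         return res
--
--     H = [run_lens(row[:cols]) for row in grid]
--     Vt = [run_lens([grid[r][c] for r in range(rows)]) for c in range(cols)]
--
--     row_lines = {}
--     col_lines = {}
--     for r in range(rows):
--         for c in range(cols):
--             color = grid[r][c]
--             if color == bg:
--                 continue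
--             h, v = H[r][c], Vt[c][r]
--             if h >= 2 and h > v:
--                 row_lines.setdefault(r, color)
--             elif v >= 2 and v > h:
--                 col_lines.setdefault(c, color)
--             elif h >= 2 and v >= 2:
--                 col_lines.setdefault(c, color)
--
--     return [[inter_color if r in row_lines and c in col_lines
--              else row_lines[r] if r in row_lines
--              else col_lines.get(c, bg)
--              for c in range(cols)]
--             for r in range(rows)]
-- ===== Notes on version B (the rewrite author's own statement) =====
-- stated objective: alternative
-- what changed: A rescans left/right/up/down from every non-background pixel to get its run lengths; B instead precomputes, per row and per column, the length of the maximal constant run containing each cell (a forward run-length pass plus a backward broadcast pass), then classifies pixels by table lookup.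
import Mathlib
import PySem

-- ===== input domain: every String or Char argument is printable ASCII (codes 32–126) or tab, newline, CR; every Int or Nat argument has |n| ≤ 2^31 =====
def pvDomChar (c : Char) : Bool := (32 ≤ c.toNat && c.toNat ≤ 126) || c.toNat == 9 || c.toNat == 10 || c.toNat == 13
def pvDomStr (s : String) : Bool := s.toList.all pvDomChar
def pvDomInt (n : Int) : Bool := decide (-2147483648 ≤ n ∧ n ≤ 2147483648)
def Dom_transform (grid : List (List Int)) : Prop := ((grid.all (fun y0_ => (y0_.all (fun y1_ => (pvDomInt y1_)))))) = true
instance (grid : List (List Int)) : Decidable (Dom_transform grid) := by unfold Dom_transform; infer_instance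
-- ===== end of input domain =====

-- B replaces A's per-pixel left/right/up/down run scans by per-row and per-column
-- run-length tables computed in two linear passes each (objective: alternative algorithm;
-- not measurably faster on the timing inputs, whose runs are short).

-- ===== PORT A =====
-- grid[r][c] (both Pythons index only with 0 ≤ r < rows, 0 ≤ c < cols, in range under Pre_)
def pvCell (grid : List (List Int)) (r c : Nat) : Int := (grid.getD r []).getD c 0

-- Counter(grid[r][c] for r in range(rows) for c in range(cols)).most_common(1)[0][0]
-- (most_common = items sorted by count, descending, stable; identical line in A and B)
def pvBg (grid : List (List Int)) : Int :=
  let rows := grid.length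
  let cols := grid.headI.length
  let cnt := PySem.Dict.counter
    ((List.range rows).flatMap (fun r => (List.range cols).map (fun c => pvCell grid r c)))
  ((PySem.List.sorted cnt.items (fun p => p.2) true).headI).1

-- non_bg = Counter(v for r in grid for v in r if v != bg); inter_color from most_common()
-- (identical line in A and B; list indexing sorted_colors[0]/[1] is in range under Pre_)
def pvInter (grid : List (List Int)) (bg : Int) : Int :=
  let nonbg := PySem.Dict.counter (grid.flatMap (fun row => row.filter (fun v => !(v == bg))))
  let sc := PySem.List.sorted nonbg.items (fun p => p.2) true
  if 2 ≤ sc.length then (sc.getD 1 (0, 0)).1 else (sc.getD 0 (0, 0)).1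

-- while l > 0 and f(l-1) == color: l -= 1   (returns final l)
def pvScanLow (f : Nat → Int) (color : Int) : Nat → Nat
  | 0 => 0
  | l + 1 => if f l == color then pvScanLow f color l else l + 1

-- while i < n-1 and f(i+1) == color: i += 1   (returns final i)
def pvScanHigh (f : Nat → Int) (n : Nat) (color : Int) (i : Nat) : Nat :=
  if h : i + 1 < n ∧ f (i + 1) == color then pvScanHigh f n color (i + 1) else i
termination_by n - i
decreasing_by omega

-- h_run_len(r, c)
def pvHRun (grid : List (List Int)) (cols : Nat) (r c : Nat) : Nat :=
  let color := pvCell grid r c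
  pvScanHigh (pvCell grid r) cols color c - pvScanLow (pvCell grid r) color c + 1

-- v_run_len(r, c)
def pvVRun (grid : List (List Int)) (rows : Nat) (r c : Nat) : Nat :=
  let color := pvCell grid r c
  pvScanHigh (fun t => pvCell grid t c) rows color r - pvScanLow (fun t => pvCell grid t c) color r + 1

-- the double loop building row_lines / col_lines ("if r not in row_lines: row_lines[r] = color")
def pvLinesA (grid : List (List Int)) (rows cols : Nat) (bg : Int) :
    PySem.Dict Int Int × PySem.Dict Int Int :=
  (List.range rows).foldl (fun st r => (List.range cols).foldl (fun st c =>
    let color := pvCell grid r c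
    if color == bg then st
    else
      let h := pvHRun grid cols r c
      let v := pvVRun grid rows r c
      if 2 ≤ h ∧ v < h then
        (if st.1.contains (r : Int) then st else (st.1.insert (r : Int) color, st.2))
      else if 2 ≤ v ∧ h < v then
        (if st.2.contains (c : Int) then st else (st.1, st.2.insert (c : Int) color))
      else if 2 ≤ h ∧ 2 ≤ v then
        (if st.2.contains (c : Int) then st else (st.1, st.2.insert (c : Int) color))
      else st) st) (PySem.Dict.empty, PySem.Dict.empty)

def transform (grid : List (List Int)) : List (List Int) :=
  let rows := grid.length
  let cols := grid.headI.length
  let bg := pvBg grid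
  let interColor := pvInter grid bg
  let st := pvLinesA grid rows cols bg
  let rowLines := st.1
  let colLines := st.2
  -- out = [[bg]*cols for _ in range(rows)]; then the double loop mutates out[r][c]
  (List.range rows).foldl (fun o (r : Nat) => (List.range cols).foldl (fun o (c : Nat) =>
    let rLine := rowLines.contains (r : Int)
    let cLine := colLines.contains (c : Int)
    if rLine && cLine then o.modify r (fun row => row.set c interColor)
    else if rLine then o.modify r (fun row => row.set c (rowLines.getD (r : Int) 0))
    else if cLine then o.modify r (fun row => row.set c (colLines.getD (c : Int) 0))
    else o) o) (List.replicate rows (List.replicate cols bg))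

-- ===== PORT B =====
-- first pass of run_lens: left.append(left[-1] + 1 if c > 0 and line[c-1] == line[c] else 1)
-- (prev carries the previous element and its left-value, i.e. line[c-1] and left[-1])
def pvLeftGo (prev : Option (Int × Nat)) : List Int → List Nat
  | [] => []
  | x :: xs =>
    let v : Nat := match prev with
      | some (p, lv) => if p == x then lv + 1 else 1
      | none => 1
    v :: pvLeftGo (some (x, v)) xs

-- second pass, right to left over (line[c], left[c]) pairs: res[c] = res[c+1] if
-- c+1 < n and line[c+1] == line[c] else left[c]  (built back-to-front, so no final reverse)
def pvResGo : List (Int × Nat) → List Nat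
  | [] => []
  | (x, lv) :: rest =>
    let r := pvResGo rest
    (match rest.head?, r.head? with
     | some (x', _), some rv => if x' == x then rv else lv
     | _, _ => lv) :: r

def pvRunLens (line : List Int) : List Nat := pvResGo (line.zip (pvLeftGo none line))

-- the same classification loop, reading the precomputed H / Vt tables
def pvLinesB (grid : List (List Int)) (rows cols : Nat) (bg : Int) (H Vt : List (List Nat)) :
    PySem.Dict Int Int × PySem.Dict Int Int :=
  (List.range rows).foldl (fun st r => (List.range cols).foldl (fun st c =>
    let color := pvCell grid r c
    if color == bg then st
    else
      let h := (H.getD r []).getD c 0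
      let v := (Vt.getD c []).getD r 0
      if 2 ≤ h ∧ v < h then (st.1.setdefault (r : Int) color, st.2)
      else if 2 ≤ v ∧ h < v then (st.1, st.2.setdefault (c : Int) color)
      else if 2 ≤ h ∧ 2 ≤ v then (st.1, st.2.setdefault (c : Int) color)
      else st) st) (PySem.Dict.empty, PySem.Dict.empty)

def transform_alt (grid : List (List Int)) : List (List Int) :=
  let rows := grid.length
  let cols := grid.headI.length
  let bg := pvBg grid
  let interColor := pvInter grid bg
  -- H = [run_lens(row[:cols]) for row in grid]; Vt = [run_lens(column c) for c in range(cols)]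
  let H := grid.map (fun row => pvRunLens (row.take cols))
  let Vt := (List.range cols).map (fun c => pvRunLens ((List.range rows).map (fun r => pvCell grid r c)))
  let st := pvLinesB grid rows cols bg H Vt
  -- the final nested comprehension
  (List.range rows).map (fun (r : Nat) => (List.range cols).map (fun (c : Nat) =>
    if st.1.contains (r : Int) && st.2.contains (c : Int) then interColor
    else if st.1.contains (r : Int) then st.1.getD (r : Int) 0
    else st.2.getD (c : Int) bg))

-- ===== PRECONDITION & SPEC =====
-- Pre_ is exactly where the Python A returns: a nonempty grid with a nonempty first row,
-- every row at least cols = len(grid[0]) wide (a shorter row is an IndexError), and not all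
-- values equal (otherwise the non-background Counter is empty and most_common()[0] is an
-- IndexError).
def Pre_transform (grid : List (List Int)) : Prop :=
  0 < grid.length ∧ 0 < grid.headI.length ∧
    (∀ row ∈ grid, grid.headI.length ≤ row.length) ∧
    ∃ v ∈ grid.flatten, v ≠ grid.headI.headI
instance (grid : List (List Int)) : Decidable (Pre_transform grid) := by
  unfold Pre_transform; infer_instance

def pvWitness_transform : List (List Int) := [[1, 1], [2, 0]]

def Spec_transform (grid : List (List Int)) (out : List (List Int)) : Prop := out = transform_alt grid
instance (grid : List (List Int)) (out : List (List Int)) : Decidable (Spec_transform grid out) := by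
  unfold Spec_transform; infer_instance

-- ===== CLAIM (what is proved, stated in full; the proofs are below) =====
def Claim_equal_transform : Prop :=
  ∀ (grid : List (List Int)), Dom_transform grid → Pre_transform grid →
    Spec_transform grid (transform grid)

-- ===== LEMMAS AND PROOFS =====

-- ---- generic fold shapes for A's mutation loops ----

-- a loop of modifications at index r+1 leaves the head alone
theorem pv_foldmod_shift {b_ : Type} (G : Nat → b_ → b_) :
    ∀ (L : List Nat) (a : b_) (acc : List b_),
      L.foldl (fun acc r => acc.modify (r + 1) (G r)) (a :: acc)
        = a :: L.foldl (fun acc r => acc.modify r (G r)) acc := by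
  intro L
  induction L with
  | nil => intro a acc; rfl
  | cons x t ih =>
    intro a acc
    simp only [List.foldl_cons, List.modify_succ_cons]
    exact ih a _

-- out[r] = F(out[r]) for r in range(n), starting from [b]*n, is a map
theorem pv_foldmod_replicate {b_ : Type} :
    ∀ (n : Nat) (F : Nat → b_ → b_) (b : b_),
      (List.range n).foldl (fun acc r => acc.modify r (F r)) (List.replicate n b)
        = (List.range n).map (fun r => F r b) := by
  intro n
  induction n with
  | zero => intro F b; rfl
  | succ m ih =>
    intro F b
    rw [List.range_succ_eq_map, List.replicate_succ]
    simp only [List.foldl_cons, List.modify_zero_cons, List.foldl_map, List.map_cons,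
      List.map_map]
    rw [pv_foldmod_shift (fun r => F (r + 1)) (List.range m) (F 0 b) (List.replicate m b)]
    rw [ih (fun r => F (r + 1)) b]
    rfl

theorem pv_foldset_shift {a_ : Type} (w : Nat → a_) (P : Nat → Prop) [DecidablePred P] :
    ∀ (L : List Nat) (a : a_) (acc : List a_),
      L.foldl (fun row c => if P c then row.set (c + 1) (w c) else row) (a :: acc)
        = a :: L.foldl (fun row c => if P c then row.set c (w c) else row) acc := by
  intro L
  induction L with
  | nil => intro a acc; rfl
  | cons x t ih =>
    intro a acc
    simp only [List.foldl_cons]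
    by_cases hx : P x
    · simp only [hx, if_true, List.set_cons_succ]; exact ih a _
    · simp only [hx, if_false]; exact ih a _

-- conditional sets into [b]*n are a map
theorem pv_foldset_replicate {a_ : Type} :
    ∀ (n : Nat) (w : Nat → a_) (P : Nat → Prop) [DecidablePred P] (b : a_),
      (List.range n).foldl (fun row c => if P c then row.set c (w c) else row)
          (List.replicate n b)
        = (List.range n).map (fun c => if P c then w c else b) := by
  intro n
  induction n with
  | zero => intro w P _ b; rfl
  | succ m ih =>
    intro w P _ b
    rw [List.range_succ_eq_map, List.replicate_succ]
    simp only [List.foldl_cons, List.foldl_map, List.map_cons, List.map_map]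
    by_cases h0 : P 0
    · simp only [h0, if_true, List.set_cons_zero]
      rw [pv_foldset_shift (fun c => w (c + 1)) (fun c => P (c + 1)) (List.range m) (w 0)
        (List.replicate m b)]
      rw [ih (fun c => w (c + 1)) (fun c => P (c + 1)) b]
      rfl
    · simp only [h0, if_false]
      rw [pv_foldset_shift (fun c => w (c + 1)) (fun c => P (c + 1)) (List.range m) b
        (List.replicate m b)]
      rw [ih (fun c => w (c + 1)) (fun c => P (c + 1)) b]
      rfl

-- an inner loop that only ever modifies row r collapses to one modification of row r
theorem pv_collapse {b_ : Type} (Q : Nat → Prop) [DecidablePred Q] (g : Nat → b_ → b_)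
    (r : Nat) :
    ∀ (L : List Nat) (o : List b_),
      L.foldl (fun o c => if Q c then o.modify r (g c) else o) o
        = o.modify r (fun row => L.foldl (fun row c => if Q c then g c row else row) row) := by
  intro L
  induction L with
  | nil =>
    intro o
    show o = o.modify r (fun row => row)
    rw [show (fun (row : b_) => row) = @id b_ from rfl, List.modify_id]
  | cons x t ih =>
    intro o
    simp only [List.foldl_cons]
    by_cases hx : Q x
    · simp only [hx, if_true]
      rw [ih (o.modify r (g x)), List.modify_modify_eq]
      rfl
    · simp only [hx, if_false]
      rw [ih o]

-- ---- B's two passes compute A's scan lengths ----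

theorem pv_leftGo_length : ∀ (l : List Int) (prev : Option (Int × Nat)),
    (pvLeftGo prev l).length = l.length := by
  intro l
  induction l with
  | nil => intro prev; rfl
  | cons x xs ih => intro prev; simp [pvLeftGo, ih]

theorem pv_resGo_length : ∀ (zs : List (Int × Nat)), (pvResGo zs).length = zs.length := by
  intro zs
  induction zs with
  | nil => rfl
  | cons p rest ih => obtain ⟨x, lv⟩ := p; simp [pvResGo, ih]

theorem pv_leftGo_succ : ∀ (l : List Int) (prev : Option (Int × Nat)) (c : Nat),
    c + 1 < l.length →
    (pvLeftGo prev l).getD (c + 1) 0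
      = (if l.getD c 0 == l.getD (c + 1) 0 then (pvLeftGo prev l).getD c 0 + 1 else 1) := by
  intro l
  induction l with
  | nil => intro prev c h; simp at h
  | cons x xs ih =>
    intro prev c h
    match c, xs, h with
    | 0, y :: ys, _ =>
      simp [pvLeftGo]
    | c' + 1, xs, h =>
      have h' : c' + 1 < xs.length := by simpa using h
      simpa [pvLeftGo] using ih (some (x, _)) c' h'

theorem pvScanLow_le (f : Nat → Int) (color : Int) : ∀ c, pvScanLow f color c ≤ c := by
  intro c
  induction c with
  | zero => simp [pvScanLow]
  | succ l ih =>
    by_cases h : f l == color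
    · simp only [pvScanLow, h, if_true]; omega
    · simp [pvScanLow, h]

theorem pv_left_eq_scan (line : List Int) : ∀ c, c < line.length →
    (pvLeftGo none line).getD c 0
      = c - pvScanLow (fun j => line.getD j 0) (line.getD c 0) c + 1 := by
  intro c
  induction c with
  | zero =>
    intro h
    match line, h with
    | x :: xs, _ => simp [pvLeftGo, pvScanLow]
  | succ c ih =>
    intro h
    rw [pv_leftGo_succ line none c h]
    have hstep : pvScanLow (fun j => line.getD j 0) (line.getD (c + 1) 0) (c + 1)
        = if line.getD c 0 == line.getD (c + 1) 0
          then pvScanLow (fun j => line.getD j 0) (line.getD (c + 1) 0) c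
          else c + 1 := rfl
    by_cases heq : (line.getD c 0 == line.getD (c + 1) 0) = true
    · have heq' : line.getD c 0 = line.getD (c + 1) 0 := by simpa using heq
      have hle := pvScanLow_le (fun j => line.getD j 0) (line.getD c 0) c
      rw [if_pos heq, ih (by omega), hstep, if_pos heq, ← heq']
      omega
    · rw [if_neg heq, hstep, if_neg heq]
      omega

theorem pv_zip_getD (line : List Int) (ls : List Nat) (c : Nat)
    (h1 : c < line.length) (h2 : c < ls.length) :
    (line.zip ls).getD c (0, 0) = (line.getD c 0, ls.getD c 0) := by
  have hz : c < (line.zip ls).length := by simp [List.length_zip]; omega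
  rw [List.getD_eq_getElem _ _ hz, List.getD_eq_getElem _ _ h1, List.getD_eq_getElem _ _ h2]
  exact List.getElem_zip

theorem pv_resGo_getD : ∀ (zs : List (Int × Nat)) (c : Nat), c < zs.length →
    (pvResGo zs).getD c 0
      = if c + 1 < zs.length ∧ (zs.getD (c + 1) (0, 0)).1 == (zs.getD c (0, 0)).1
        then (pvResGo zs).getD (c + 1) 0 else (zs.getD c (0, 0)).2 := by
  intro zs
  induction zs with
  | nil => intro c h; simp at h
  | cons p rest ih =>
    obtain ⟨x, lv⟩ := p
    intro c h
    match c with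
    | 0 =>
      cases rest with
      | nil => simp [pvResGo]
      | cons q rest' =>
        obtain ⟨x', lv'⟩ := q
        have hne : pvResGo ((x', lv') :: rest') ≠ [] := by
          have := pv_resGo_length ((x', lv') :: rest')
          intro hnil
          rw [hnil] at this
          simp at this
        obtain ⟨r0, rtail, hr⟩ := List.exists_cons_of_ne_nil hne
        by_cases hxx : (x' == x) = true <;>
          simp [pvResGo, hxx, List.getD]
    | c' + 1 =>
      have h' : c' < rest.length := by simpa using h
      have hL : (pvResGo ((x, lv) :: rest)).getD (c' + 1) 0 = (pvResGo rest).getD c' 0 := by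
        cases rest with
        | nil => simp at h'
        | cons q rest' => obtain ⟨x', lv'⟩ := q; simp [pvResGo, List.getD]
      rw [hL, ih c' h']
      by_cases hcond : c' + 1 < rest.length ∧
          (rest.getD (c' + 1) (0, 0)).1 == (rest.getD c' (0, 0)).1
      · rw [if_pos hcond, if_pos (by
          constructor
          · simpa using hcond.1
          · simpa [List.getD] using hcond.2)]
        cases rest with
        | nil => simp at h'
        | cons q rest' => obtain ⟨x', lv'⟩ := q; simp [pvResGo, List.getD]
      · rw [if_neg hcond, if_neg (by
          intro hk
          exact hcond ⟨by simpa using hk.1, by simpa [List.getD] using hk.2⟩)]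
        simp [List.getD]

-- the two passes give exactly A's run length: scanHigh - scanLow + 1
theorem pv_runLens_getD (line : List Int) : ∀ (c : Nat), c < line.length →
    (pvRunLens line).getD c 0
      = pvScanHigh (fun j => line.getD j 0) line.length (line.getD c 0) c
          - pvScanLow (fun j => line.getD j 0) (line.getD c 0) c + 1 := by
  have aux : ∀ (k c : Nat), c < line.length → line.length - c ≤ k →
      (pvRunLens line).getD c 0
        = pvScanHigh (fun j => line.getD j 0) line.length (line.getD c 0) c
            - pvScanLow (fun j => line.getD j 0) (line.getD c 0) c + 1 := by
    intro k
    induction k with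
    | zero => intro c hc hk; omega
    | succ k ih =>
      intro c hc hk
      have hlen : (line.zip (pvLeftGo none line)).length = line.length := by
        simp [List.length_zip, pv_leftGo_length]
      have hlenL : (pvLeftGo none line).length = line.length := pv_leftGo_length line none
      have hres : (pvRunLens line).getD c 0
          = if c + 1 < (line.zip (pvLeftGo none line)).length ∧
              (((line.zip (pvLeftGo none line)).getD (c + 1) (0, 0)).1 ==
                ((line.zip (pvLeftGo none line)).getD c (0, 0)).1) = true
            then (pvRunLens line).getD (c + 1) 0
            else ((line.zip (pvLeftGo none line)).getD c (0, 0)).2 :=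
        pv_resGo_getD (line.zip (pvLeftGo none line)) c (by omega)
      by_cases hcond : c + 1 < line.length ∧ (line.getD (c + 1) 0 == line.getD c 0) = true
      · have hgd1 : (line.zip (pvLeftGo none line)).getD (c + 1) (0, 0)
            = (line.getD (c + 1) 0, (pvLeftGo none line).getD (c + 1) 0) :=
          pv_zip_getD line _ (c + 1) (by omega) (by omega)
        have hgd0 : (line.zip (pvLeftGo none line)).getD c (0, 0)
            = (line.getD c 0, (pvLeftGo none line).getD c 0) :=
          pv_zip_getD line _ c (by omega) (by omega)
        rw [hres, if_pos (by rw [hgd1, hgd0]; exact ⟨by omega, hcond.2⟩)]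
        have heq' : line.getD (c + 1) 0 = line.getD c 0 := by
          simpa using hcond.2
        rw [ih (c + 1) hcond.1 (by omega)]
        have hhigh : pvScanHigh (fun j => line.getD j 0) line.length (line.getD c 0) c
            = pvScanHigh (fun j => line.getD j 0) line.length (line.getD c 0) (c + 1) := by
          conv_lhs => rw [pvScanHigh]
          rw [dif_pos ⟨hcond.1, by simpa using hcond.2⟩]
        have hlow : pvScanLow (fun j => line.getD j 0) (line.getD (c + 1) 0) (c + 1)
            = pvScanLow (fun j => line.getD j 0) (line.getD (c + 1) 0) c := by
          rw [show pvScanLow (fun j => line.getD j 0) (line.getD (c + 1) 0) (c + 1)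
              = if line.getD c 0 == line.getD (c + 1) 0
                then pvScanLow (fun j => line.getD j 0) (line.getD (c + 1) 0) c
                else c + 1 from rfl]
          rw [if_pos (by simpa using heq'.symm)]
        rw [hlow, heq', hhigh]
      · have hgd0 : (line.zip (pvLeftGo none line)).getD c (0, 0)
            = (line.getD c 0, (pvLeftGo none line).getD c 0) :=
          pv_zip_getD line _ c (by omega) (by omega)
        rw [hres, if_neg (by
          intro hk
          apply hcond
          have h1 : c + 1 < line.length := by omega
          refine ⟨h1, ?_⟩
          have := hk.2
          rw [pv_zip_getD line _ (c + 1) (by omega) (by omega), hgd0] at this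
          exact this)]
        rw [hgd0]
        have hhigh : pvScanHigh (fun j => line.getD j 0) line.length (line.getD c 0) c = c := by
          conv_lhs => rw [pvScanHigh]
          rw [dif_neg (by
            intro hk
            exact hcond ⟨hk.1, by simpa using hk.2⟩)]
        rw [hhigh]
        exact pv_left_eq_scan line c hc
  intro c hc
  exact aux (line.length - c) c hc (by omega)

-- the scans only look below the bound, so they may be read off any agreeing function
theorem pvScanLow_congr (f f' : Nat → Int) (color : Int) :
    ∀ c, (∀ j, j < c → f j = f' j) → pvScanLow f color c = pvScanLow f' color c := by
  intro c
  induction c with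
  | zero => intro _; rfl
  | succ l ih =>
    intro h
    show (if f l == color then pvScanLow f color l else l + 1)
        = (if f' l == color then pvScanLow f' color l else l + 1)
    rw [h l (by omega), ih (fun j hj => h j (by omega))]

theorem pvScanHigh_congr (f f' : Nat → Int) (n : Nat) (color : Int) :
    ∀ i, (∀ j, j < n → f j = f' j) → pvScanHigh f n color i = pvScanHigh f' n color i := by
  have aux : ∀ (k i : Nat), n - i ≤ k → (∀ j, j < n → f j = f' j) →
      pvScanHigh f n color i = pvScanHigh f' n color i := by
    intro k
    induction k with
    | zero =>
      intro i hk h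
      conv_lhs => rw [pvScanHigh]
      conv_rhs => rw [pvScanHigh]
      rw [dif_neg (fun hc : i + 1 < n ∧ (f (i + 1) == color) = true => absurd hc.1 (by omega)),
        dif_neg (fun hc : i + 1 < n ∧ (f' (i + 1) == color) = true => absurd hc.1 (by omega))]
    | succ k ih =>
      intro i hk h
      by_cases h1 : i + 1 < n
      · have hf : f (i + 1) = f' (i + 1) := h _ h1
        conv_lhs => rw [pvScanHigh]
        conv_rhs => rw [pvScanHigh]
        rw [hf]
        by_cases h2 : i + 1 < n ∧ (f' (i + 1) == color) = true
        · rw [dif_pos h2, dif_pos h2]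
          exact ih (i + 1) (by omega) h
        · rw [dif_neg h2, dif_neg h2]
      · conv_lhs => rw [pvScanHigh]
        conv_rhs => rw [pvScanHigh]
        rw [dif_neg (fun hc : i + 1 < n ∧ (f (i + 1) == color) = true => absurd hc.1 h1),
          dif_neg (fun hc : i + 1 < n ∧ (f' (i + 1) == color) = true => absurd hc.1 h1)]
  intro i h
  exact aux (n - i) i (by omega) h

theorem pv_H_eq (grid : List (List Int)) (cols r c : Nat)
    (hr : r < grid.length) (hc : c < cols) (hlen : cols ≤ (grid.getD r []).length) :
    ((grid.map (fun row => pvRunLens (row.take cols))).getD r []).getD c 0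
      = pvHRun grid cols r c := by
  have hrow : (grid.map (fun row => pvRunLens (row.take cols))).getD r []
      = pvRunLens ((grid.getD r []).take cols) := by
    rw [List.getD_eq_getElem _ _ (by simpa using hr), List.getElem_map,
      List.getD_eq_getElem _ _ hr]
  have hlt : ((grid.getD r []).take cols).length = cols := by
    simp only [List.length_take]
    omega
  have hag : ∀ j, j < cols → ((grid.getD r []).take cols).getD j 0 = pvCell grid r j := by
    intro j hj
    rw [List.getD_eq_getElem _ _ (by omega), List.getElem_take, pvCell]
    exact (List.getD_eq_getElem _ _ (by omega)).symm
  rw [hrow, pv_runLens_getD _ c (by omega), hlt]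
  simp only [pvHRun]
  rw [hag c hc,
    pvScanHigh_congr _ (pvCell grid r) cols _ c (fun j hj => hag j hj),
    pvScanLow_congr _ (pvCell grid r) _ c (fun j hj => hag j (by omega))]

theorem pv_V_eq (grid : List (List Int)) (rows cols r c : Nat)
    (hr : r < rows) (hc : c < cols) :
    (((List.range cols).map (fun c =>
        pvRunLens ((List.range rows).map (fun t => pvCell grid t c)))).getD c []).getD r 0
      = pvVRun grid rows r c := by
  have hrow : ((List.range cols).map (fun c =>
        pvRunLens ((List.range rows).map (fun t => pvCell grid t c)))).getD c []
      = pvRunLens ((List.range rows).map (fun t => pvCell grid t c)) := by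
    rw [List.getD_eq_getElem _ _ (by simpa using hc), List.getElem_map, List.getElem_range]
  have hlt : ((List.range rows).map (fun t => pvCell grid t c)).length = rows := by simp
  have hag : ∀ j, j < rows →
      ((List.range rows).map (fun t => pvCell grid t c)).getD j 0 = pvCell grid j c := by
    intro j hj
    rw [List.getD_eq_getElem _ _ (by simpa using hj), List.getElem_map, List.getElem_range]
  rw [hrow, pv_runLens_getD _ r (by simpa using hr), hlt]
  simp only [pvVRun]
  rw [hag r hr,
    pvScanHigh_congr _ (fun t => pvCell grid t c) rows _ r (fun j hj => hag j hj),
    pvScanLow_congr _ (fun t => pvCell grid t c) _ r (fun j hj => hag j (by omega))]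

-- ---- the two classification loops build the same dictionaries ----

theorem pv_lines_eq (grid : List (List Int)) (hpre : Pre_transform grid) (bg : Int) :
    pvLinesB grid grid.length grid.headI.length bg
        (grid.map (fun row => pvRunLens (row.take grid.headI.length)))
        ((List.range grid.headI.length).map (fun c =>
          pvRunLens ((List.range grid.length).map (fun r => pvCell grid r c))))
      = pvLinesA grid grid.length grid.headI.length bg := by
  obtain ⟨hrows, hcols, hrect, -⟩ := hpre
  unfold pvLinesA pvLinesB
  apply PySem.List.foldl_congr_mem
  intro st r hrmem
  have hr : r < grid.length := List.mem_range.mp hrmem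
  apply PySem.List.foldl_congr_mem
  intro st' c hcmem
  have hc : c < grid.headI.length := List.mem_range.mp hcmem
  have hlen : grid.headI.length ≤ (grid.getD r []).length := by
    apply hrect
    rw [List.getD_eq_getElem _ _ hr]
    exact List.getElem_mem hr
  simp only [pv_H_eq grid grid.headI.length r c hr hc hlen,
    pv_V_eq grid grid.length grid.headI.length r c hr hc]
  by_cases hbg : (pvCell grid r c == bg) = true
  · rw [if_pos hbg, if_pos hbg]
  · rw [if_neg hbg, if_neg hbg]
    cases hc1 : st'.1.contains (r : Int) <;> cases hc2 : st'.2.contains (c : Int) <;>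
      simp [PySem.Dict.setdefault_of_contains, PySem.Dict.setdefault_of_not_contains,
        hc1, hc2]

-- ---- A's mutated output equals B's comprehension ----

theorem pv_out_eq (RL CL : PySem.Dict Int Int) (inter bg : Int) (rows cols : Nat) :
    (List.range rows).foldl (fun o (r : Nat) => (List.range cols).foldl (fun o (c : Nat) =>
        if RL.contains (r : Int) && CL.contains (c : Int) then
          o.modify r (fun row => row.set c inter)
        else if RL.contains (r : Int) then o.modify r (fun row => row.set c (RL.getD (r : Int) 0))
        else if CL.contains (c : Int) then o.modify r (fun row => row.set c (CL.getD (c : Int) 0))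
        else o) o) (List.replicate rows (List.replicate cols bg))
      = (List.range rows).map (fun (r : Nat) => (List.range cols).map (fun (c : Nat) =>
          if RL.contains (r : Int) && CL.contains (c : Int) then inter
          else if RL.contains (r : Int) then RL.getD (r : Int) 0
          else CL.getD (c : Int) bg)) := by
  have key : ∀ r c : Nat,
      (if (RL.contains (r : Int) || CL.contains (c : Int)) = true
       then (if RL.contains (r : Int) && CL.contains (c : Int) then inter
             else if RL.contains (r : Int) then RL.getD (r : Int) 0 else CL.getD (c : Int) 0)
       else bg)
      = (if RL.contains (r : Int) && CL.contains (c : Int) then inter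
         else if RL.contains (r : Int) then RL.getD (r : Int) 0
         else CL.getD (c : Int) bg) := by
    intro r c
    have hCL : CL.contains (c : Int) = true → CL.getD (c : Int) 0 = CL.getD (c : Int) bg := by
      intro h2
      rw [PySem.Dict.getD_eq_get?_getD, PySem.Dict.getD_eq_get?_getD]
      have hs : (CL.get? (c : Int)).isSome := by
        rw [← PySem.Dict.contains_eq_isSome_get?, h2]
      obtain ⟨v, hv⟩ := Option.isSome_iff_exists.mp hs
      rw [hv]
      rfl
    cases h1 : RL.contains (r : Int) <;> cases h2 : CL.contains (c : Int) <;>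
      simp [h2, hCL, PySem.Dict.getD_of_not_contains CL bg]
  calc
    (List.range rows).foldl (fun o (r : Nat) => (List.range cols).foldl (fun o (c : Nat) =>
        if RL.contains (r : Int) && CL.contains (c : Int) then
          o.modify r (fun row => row.set c inter)
        else if RL.contains (r : Int) then o.modify r (fun row => row.set c (RL.getD (r : Int) 0))
        else if CL.contains (c : Int) then o.modify r (fun row => row.set c (CL.getD (c : Int) 0))
        else o) o) (List.replicate rows (List.replicate cols bg))
      = (List.range rows).foldl (fun o (r : Nat) =>
          o.modify r (fun row => (List.range cols).foldl (fun row (c : Nat) =>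
            if (RL.contains (r : Int) || CL.contains (c : Int)) = true then
              row.set c (if RL.contains (r : Int) && CL.contains (c : Int) then inter
                else if RL.contains (r : Int) then RL.getD (r : Int) 0
                else CL.getD (c : Int) 0)
            else row) row)) (List.replicate rows (List.replicate cols bg)) := by
        apply PySem.List.foldl_congr_mem
        intro o r _
        rw [← pv_collapse (fun c => (RL.contains (r : Int) || CL.contains (c : Int)) = true)
          (fun c row => row.set c (if RL.contains (r : Int) && CL.contains (c : Int) then inter
            else if RL.contains (r : Int) then RL.getD (r : Int) 0
            else CL.getD (c : Int) 0)) r (List.range cols) o]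
        apply PySem.List.foldl_congr_mem
        intro acc c _
        cases RL.contains (r : Int) <;> cases CL.contains (c : Int)
        · simp only [Bool.false_and, Bool.or_self, Bool.false_eq_true, ite_false]
        · simp only [Bool.false_and, Bool.false_or, Bool.false_eq_true, ite_false, ite_true]
        · simp only [Bool.true_and, Bool.true_or, Bool.false_eq_true, ite_false, ite_true]
        · simp only [Bool.true_and, Bool.true_or, ite_true]
    _ = (List.range rows).map (fun (r : Nat) =>
          (List.range cols).foldl (fun row (c : Nat) =>
            if (RL.contains (r : Int) || CL.contains (c : Int)) = true then
              row.set c (if RL.contains (r : Int) && CL.contains (c : Int) then inter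
                else if RL.contains (r : Int) then RL.getD (r : Int) 0
                else CL.getD (c : Int) 0)
            else row) (List.replicate cols bg)) :=
        pv_foldmod_replicate rows _ _
    _ = (List.range rows).map (fun (r : Nat) => (List.range cols).map (fun (c : Nat) =>
          if RL.contains (r : Int) && CL.contains (c : Int) then inter
          else if RL.contains (r : Int) then RL.getD (r : Int) 0
          else CL.getD (c : Int) bg)) := by
        apply List.map_congr_left
        intro r _
        rw [pv_foldset_replicate cols _ _ bg]
        apply List.map_congr_left
        intro c _
        exact key r c

-- ===== VERDICT (by name: the statement is the Claim_ definition above) =====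
theorem transform_spec : Claim_equal_transform := by
  intro grid _ hpre
  unfold Spec_transform
  simp only [transform, transform_alt]
  rw [pv_lines_eq grid hpre (pvBg grid)]
  exact pv_out_eq _ _ _ _ _ _
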